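-- pv_equiv track=rewrite | github.com/Ilham510/projet20242025 | projet.py | extraire_sequences
-- ===== SOURCE A (Python) =====
-- def extraire_sequences(mirna_data, species_list):
--     """Extrait les séquences des espèces spécifiées."""
--     sequences = {species: [] for species in species_list}
--     for line in mirna_data:
--         parts = line.split()
--         if len(parts) < 9:  # Pour éviter les lignes mal formatées
--             continue
--         espece, sequence = parts[4], parts[8]
--         if espece in sequences:
--             sequences[espece].append(sequence)
--     return sequences
-- ===== SOURCE B (Python) =====
-- def extraire_sequences(mirna_data, species_list):
--     """Extrait les séquences des espèces spécifiées."""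
--     pairs = [(p[4], p[8]) for line in mirna_data if len(p := line.split()) >= 9]
--     return {sp: [seq for esp, seq in pairs if esp == sp] for sp in species_list}
-- ===== Notes on version B (the rewrite author's own statement) =====
-- stated objective: alternative
-- what changed: Instead of A's single pass dispatching each line into a pre-built per-species bucket dict, B first extracts the (parts[4], parts[8]) pairs of well-formed lines in one comprehension and then builds the result as a dict comprehension that filters those pairs once per requested species.
import Mathlib
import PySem

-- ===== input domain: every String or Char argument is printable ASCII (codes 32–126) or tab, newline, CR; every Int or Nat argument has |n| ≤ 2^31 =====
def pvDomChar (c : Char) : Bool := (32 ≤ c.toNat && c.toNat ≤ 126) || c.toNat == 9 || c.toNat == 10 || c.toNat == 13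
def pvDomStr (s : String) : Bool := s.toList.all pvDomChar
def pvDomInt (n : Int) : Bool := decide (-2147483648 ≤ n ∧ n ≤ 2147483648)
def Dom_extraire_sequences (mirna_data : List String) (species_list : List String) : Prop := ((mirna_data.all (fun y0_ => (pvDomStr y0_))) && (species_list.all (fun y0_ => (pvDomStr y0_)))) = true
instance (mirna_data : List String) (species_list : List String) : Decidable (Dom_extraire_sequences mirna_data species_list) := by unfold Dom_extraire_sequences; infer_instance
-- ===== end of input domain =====

-- B replaces A's single dispatching pass over mirna_data with a per-species dict
-- comprehension that re-filters mirna_data once per requested species (alternative decomposition).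


-- ===== PORT A =====
-- parts[4] / parts[8] are taken with pyGetD; exact here because they are only read
-- under the guard len(parts) >= 9, so the index is in range and no default is ever used.
def extraire_sequences (mirna_data : List String) (species_list : List String) : List (String × List String) :=
  let sequences : PySem.Dict String (List String) :=
    species_list.foldl (fun d species => d.insert species []) PySem.Dict.empty
  let sequences :=
    mirna_data.foldl (fun d line =>
      let parts := PySem.Str.split₀ line
      if parts.length < 9 then d
      else
        let espece := PySem.List.pyGetD parts 4 ""
        let sequence := PySem.List.pyGetD parts 8 ""
        if d.contains espece then d.modify espece [] (· ++ [sequence]) else d) sequences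
  sequences.items

-- ===== PORT B =====
-- Source B's pairs comprehension: (parts[4], parts[8]) of each well-formed line, split once
def pvPairs (mirna_data : List String) : List (String × String) :=
  mirna_data.filterMap (fun line =>
    let p := PySem.Str.split₀ line
    if 9 ≤ p.length then some (PySem.List.pyGetD p 4 "", PySem.List.pyGetD p 8 "") else none)

-- Source B's inner comprehension for one species
def pvCollectPairs (pairs : List (String × String)) (sp : String) : List String :=
  (pairs.filter (fun q => q.1 == sp)).map (·.2)

def extraire_sequences_alt (mirna_data : List String) (species_list : List String) : List (String × List String) :=
  let pairs := pvPairs mirna_data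
  (species_list.foldl (fun d sp => d.insert sp (pvCollectPairs pairs sp)) PySem.Dict.empty).items

-- ===== PRECONDITION & SPEC =====
def Spec_extraire_sequences (mirna_data : List String) (species_list : List String) (out : List (String × List String)) : Prop := out = extraire_sequences_alt mirna_data species_list
instance (mirna_data : List String) (species_list : List String) (out : List (String × List String)) : Decidable (Spec_extraire_sequences mirna_data species_list out) := by unfold Spec_extraire_sequences; infer_instance

-- ===== CLAIM (what is proved, stated in full; the proofs are below) =====
def Claim_equal_extraire_sequences : Prop := ∀ (mirna_data : List String) (species_list : List String), Dom_extraire_sequences mirna_data species_list → Spec_extraire_sequences mirna_data species_list (extraire_sequences mirna_data species_list)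

-- ===== LEMMAS AND PROOFS =====

-- proof-side view of B's nested comprehensions: one fused filterMap per species
def pvCollect (mirna_data : List String) (sp : String) : List String :=
  mirna_data.filterMap (fun line =>
    let parts := PySem.Str.split₀ line
    if 9 ≤ parts.length ∧ PySem.List.pyGetD parts 4 "" = sp then
      some (PySem.List.pyGetD parts 8 "") else none)

lemma collectPairs_eq (mirna_data : List String) (sp : String) :
    pvCollectPairs (pvPairs mirna_data) sp = pvCollect mirna_data sp := by
  induction mirna_data with
  | nil => rfl
  | cons line lines ih =>
      simp only [pvPairs, pvCollectPairs, pvCollect, List.filterMap_cons] at *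
      by_cases h9 : 9 ≤ (PySem.Str.split₀ line).length
      · by_cases hsp : PySem.List.pyGetD (PySem.Str.split₀ line) 4 "" = sp
        · simp [h9, hsp, ih]
        · simp [h9, hsp, ih]
      · simp [h9, ih]

-- a fold of inserts whose values do not depend on the accumulator: lookup
lemma getD_foldl_insert_fun (l : List String) (g : String → List String)
    (d : PySem.Dict String (List String)) (k : String) :
    (l.foldl (fun d sp => d.insert sp (g sp)) d).getD k [] =
      if k ∈ l then g k else d.getD k [] := by
  induction l generalizing d with
  | nil => simp
  | cons x l ih =>
      simp only [List.foldl_cons, ih, PySem.Dict.getD_insert, List.mem_cons]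
      by_cases hx : k = x <;> by_cases hl : k ∈ l <;> simp [hx, hl]

-- A's line loop never changes the key set
lemma keys_lineFold (lines : List String) (d : PySem.Dict String (List String)) :
    (lines.foldl (fun d line =>
      let parts := PySem.Str.split₀ line
      if parts.length < 9 then d
      else
        let espece := PySem.List.pyGetD parts 4 ""
        let sequence := PySem.List.pyGetD parts 8 ""
        if d.contains espece then d.modify espece [] (· ++ [sequence]) else d) d).keys
      = d.keys := by
  induction lines generalizing d with
  | nil => rfl
  | cons line lines ih =>
      simp only [List.foldl_cons]
      split
      · exact ih d
      · split
        · next hc => rw [ih]; exact PySem.Dict.keys_insert_of_contains _ _ hc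
        · exact ih d

-- characterisation of A's line loop: each present key accumulates exactly pvCollect
lemma getD_lineFold (lines : List String) (d : PySem.Dict String (List String)) (sp : String) :
    (lines.foldl (fun d line =>
      let parts := PySem.Str.split₀ line
      if parts.length < 9 then d
      else
        let espece := PySem.List.pyGetD parts 4 ""
        let sequence := PySem.List.pyGetD parts 8 ""
        if d.contains espece then d.modify espece [] (· ++ [sequence]) else d) d).getD sp []
      = d.getD sp [] ++ (if d.contains sp then pvCollect lines sp else []) := by
  induction lines generalizing d with
  | nil => simp [pvCollect]
  | cons line lines ih =>
      simp only [List.foldl_cons, pvCollect, List.filterMap_cons]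
      by_cases hlen : (PySem.Str.split₀ line).length < 9
      · have h9 : ¬ (9 ≤ (PySem.Str.split₀ line).length) := by omega
        simp only [hlen, if_pos]
        rw [ih]
        simp [pvCollect, h9]
      · have h9 : 9 ≤ (PySem.Str.split₀ line).length := by omega
        simp only [hlen, if_false]
        by_cases hc : d.contains (PySem.List.pyGetD (PySem.Str.split₀ line) 4 "") = true
        · simp only [hc, if_true, ih, PySem.Dict.contains_modify, PySem.Dict.getD_modify]
          by_cases hsp : sp = PySem.List.pyGetD (PySem.Str.split₀ line) 4 ""
          · simp [pvCollect, hsp, hc, h9, List.append_assoc]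
          · have : ¬ (9 ≤ (PySem.Str.split₀ line).length ∧
                PySem.List.pyGetD (PySem.Str.split₀ line) 4 "" = sp) := by
              rintro ⟨-, h⟩; exact hsp h.symm
            simp [pvCollect, hsp, this]
        · simp only [hc, ih]
          by_cases hsp : sp = PySem.List.pyGetD (PySem.Str.split₀ line) 4 ""
          · have hc' : d.contains sp = false := by
              rw [hsp]; exact Bool.not_eq_true _ ▸ (by simpa using hc)
            simp [hc']
          · have : ¬ (9 ≤ (PySem.Str.split₀ line).length ∧
                PySem.List.pyGetD (PySem.Str.split₀ line) 4 "" = sp) := by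
              rintro ⟨-, h⟩; exact hsp h.symm
            simp [pvCollect, this]

-- ===== VERDICT (by name: the statement is the Claim_ definition above) =====
theorem extraire_sequences_spec : Claim_equal_extraire_sequences := by
  intro mirna_data species_list _
  unfold Spec_extraire_sequences extraire_sequences extraire_sequences_alt
  -- both dicts: same key list, Nodup keys, same getD at every key ⇒ same items
  set dA0 : PySem.Dict String (List String) :=
    species_list.foldl (fun d species => d.insert species []) PySem.Dict.empty with hdA0
  set dA : PySem.Dict String (List String) :=
    mirna_data.foldl (fun d line =>
      let parts := PySem.Str.split₀ line
      if parts.length < 9 then d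
      else
        let espece := PySem.List.pyGetD parts 4 ""
        let sequence := PySem.List.pyGetD parts 8 ""
        if d.contains espece then d.modify espece [] (· ++ [sequence]) else d) dA0 with hdA
  show _ = (species_list.foldl
      (fun d sp => d.insert sp (pvCollectPairs (pvPairs mirna_data) sp)) PySem.Dict.empty).items
  set dB : PySem.Dict String (List String) :=
    species_list.foldl (fun d sp => d.insert sp (pvCollectPairs (pvPairs mirna_data) sp))
      PySem.Dict.empty with hdB
  have hkA0 : dA0.keys = PySem.Set.update PySem.Dict.empty.keys species_list :=
    PySem.Dict.keys_foldl_insert species_list (fun _ _ => []) PySem.Dict.empty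
  have hkB : dB.keys = PySem.Set.update PySem.Dict.empty.keys species_list :=
    PySem.Dict.keys_foldl_insert species_list
      (fun _ sp => pvCollectPairs (pvPairs mirna_data) sp) PySem.Dict.empty
  have hkA : dA.keys = dA0.keys := keys_lineFold mirna_data dA0
  have hkeys : dA.keys = dB.keys := by rw [hkA, hkA0, hkB]
  have hndA0 : dA0.keys.Nodup :=
    PySem.Dict.nodup_keys_foldl_insert species_list (fun _ _ => []) PySem.Dict.empty
      (by simp [PySem.Dict.keys_empty])
  have hndA : dA.keys.Nodup := by rw [hkA]; exact hndA0
  have hmem : ∀ k, k ∈ dA.keys ↔ k ∈ species_list := by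
    intro k
    rw [hkA, hkA0, PySem.Set.mem_update]
    simp [PySem.Dict.keys_empty]
  have hgetD : ∀ k ∈ dA.keys, dA.getD k [] = dB.getD k [] := by
    intro k hk
    have hkl : k ∈ species_list := (hmem k).1 hk
    have hA0get : dA0.getD k [] = [] := by
      rw [hdA0, getD_foldl_insert_fun species_list (fun _ => []) PySem.Dict.empty k]
      split <;> simp
    have hA0c : dA0.contains k = true := by
      rw [PySem.Dict.contains_iff_mem_keys]
      rw [hkA] at hk; exact hk
    rw [hdA, getD_lineFold mirna_data dA0 k, hA0get, hA0c,
        hdB, getD_foldl_insert_fun species_list (fun sp => pvCollectPairs (pvPairs mirna_data) sp)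
          PySem.Dict.empty k, if_pos hkl, collectPairs_eq]
    simp
  show dA.items = dB.items
  rw [PySem.Dict.items_eq_map_keys dA hndA [],
      PySem.Dict.items_eq_map_keys dB (hkeys ▸ hndA) [], hkeys]
  apply List.map_congr_left
  intro k hk
  rw [hgetD k (hkeys ▸ hk)]
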